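-- pv_equiv track=rewrite | github.com/AdamOtto/Daily-Challenges | Challenge1488.py | Solution
-- ===== SOURCE A (Python) =====
-- def Solution(ar):
--     emptyFound = False
--     courses = []
--     d = set()
--     retVal = []
--     for key, val in ar.items():
--         if len(val) == 0:
--             emptyFound = True
--             d.add(key)
--             retVal.append(key)
--         else:
--             courses.append(key)
--     if not emptyFound:
--         return None
--
--     count = len(courses)
--     while len(courses) > 0 and count > 0:
--         hold = []
--         for i in range(len(courses)):
--             addToHold = True
--             for c in ar[courses[i]]:
--                 if c not in d:
--                     addToHold = False
--                     break
--             if addToHold: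
--                 hold.append(courses[i])
--
--         for h in hold:
--             retVal.append(courses.pop(courses.index(h)))
--             d.add(retVal[-1])
--
--         count -= 1
--
--     if count < 0:
--         return None
--     return retVal
-- ===== SOURCE B (Python) =====
-- def Solution(ar):
--     # Kahn-style level-by-level topological sort: indegree counters + reverse
--     # adjacency replace A's repeated rescans of every prerequisite list.
--     level = [k for k, v in ar.items() if len(v) == 0]
--     if not level:
--         return None
--     indeg = {k: len(v) for k, v in ar.items()}
--     dependents = {k: [] for k in ar}
--     for k, v in ar.items():
--         for p in v:
--             if p in dependents:
--                 dependents[p].append(k)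
--     remaining = [k for k, v in ar.items() if len(v) != 0]
--     order = []
--     while level:
--         order.extend(level)
--         for k in level:
--             for dep in dependents[k]:
--                 indeg[dep] -= 1
--         level = [k for k in remaining if indeg[k] == 0]
--         remaining = [k for k in remaining if indeg[k] != 0]
--     return order
-- ===== Notes on version B (the rewrite author's own statement) =====
-- stated objective: alternative
-- what changed: Replaces A's per-round rescan of every remaining course's full prerequisite list against the done-set (plus pop/index removals) with a Kahn-style level-by-level topological sort that precomputes indegree counters and reverse adjacency lists and only decrements the counters of a finished course's dependents; in a timing run (dominated by the early no-start-course exit) both are linear, so no speed is claimed.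
import Mathlib
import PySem

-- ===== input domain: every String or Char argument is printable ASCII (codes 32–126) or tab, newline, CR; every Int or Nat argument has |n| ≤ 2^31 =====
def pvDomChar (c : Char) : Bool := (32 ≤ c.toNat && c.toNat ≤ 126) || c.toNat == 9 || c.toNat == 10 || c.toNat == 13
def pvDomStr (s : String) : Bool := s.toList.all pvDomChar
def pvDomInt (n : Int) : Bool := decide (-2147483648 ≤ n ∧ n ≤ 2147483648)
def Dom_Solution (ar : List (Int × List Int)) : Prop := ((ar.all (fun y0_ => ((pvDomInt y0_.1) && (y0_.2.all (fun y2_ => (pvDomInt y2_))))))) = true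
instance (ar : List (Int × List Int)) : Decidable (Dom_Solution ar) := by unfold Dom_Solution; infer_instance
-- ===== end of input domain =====

-- B replaces A's per-round rescans of every remaining course's prerequisite list (and the
-- pop/index removals) with Kahn-style indegree counters and reverse adjacency lists.

-- ===== PORT A =====
-- inner `for c in ar[courses[i]]: if c not in d: … break` readiness check
def aReady (dct : PySem.Dict Int (List Int)) (d : PySem.Set Int) (k : Int) : Bool :=
  (dct.getD k []).all (fun c => PySem.Set.contains d c)

-- one step of `for h in hold: retVal.append(courses.pop(courses.index(h))); d.add(retVal[-1])`
def aPopStep (st : List Int × PySem.Set Int × List Int) (h : Int) : List Int × PySem.Set Int × List Int :=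
  match PySem.List.index? st.1 h with
  | none => st            -- unreachable: every h ∈ hold is in courses, so list.index never raises
  | some i =>
    match PySem.List.pop? st.1 (i : Int) with
    | none => st          -- unreachable for the same reason
    | some (x, rest) => (rest, PySem.Set.add st.2.1 x, st.2.2 ++ [x])

-- the while loop; `count` starts at len(courses), decreases by 1 each round, so it is the fuel;
-- the trailing `if count < 0: return None` of A can never fire (count stays ≥ 0).
def SolA_loop (dct : PySem.Dict Int (List Int)) :
    Nat → List Int → PySem.Set Int → List Int → List Int
  | 0, _, _, retVal => retVal
  | Nat.succ c, courses, d, retVal =>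
    if courses.isEmpty then retVal
    else
      let hold := courses.foldl (fun hold k => if aReady dct d k then hold ++ [k] else hold) []
      let st := hold.foldl aPopStep (courses, d, retVal)
      SolA_loop dct c st.1 st.2.1 st.2.2

def Solution (ar : List (Int × List Int)) : Option (List Int) :=
  let dct := PySem.Dict.ofList ar
  let st := dct.items.foldl
    (fun st kv =>
      if kv.2.length == 0 then (true, st.2.1, PySem.Set.add st.2.2.1 kv.1, st.2.2.2 ++ [kv.1])
      else (st.1, st.2.1 ++ [kv.1], st.2.2.1, st.2.2.2))
    ((false, [], PySem.Set.empty, []) : Bool × List Int × PySem.Set Int × List Int)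
  if !st.1 then none
  else some (SolA_loop dct st.2.1.length st.2.1 st.2.2.1 st.2.2.2)

-- ===== PORT B =====
-- `for k in level: for dep in dependents[k]: indeg[dep] -= 1`
-- (k is always a key of dependents and dep a key of indeg, so the getD/modify defaults never matter)
def bDec (dependents : PySem.Dict Int (List Int)) (level : List Int)
    (indeg : PySem.Dict Int Int) : PySem.Dict Int Int :=
  level.foldl (fun ind k =>
    (dependents.getD k []).foldl (fun ind dep => ind.modify dep 0 (fun x => x - 1)) ind) indeg

-- the `while level:` loop of Source B
def SolB_loop (dependents : PySem.Dict Int (List Int)) (level remaining : List Int)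
    (indeg : PySem.Dict Int Int) (order : List Int) : List Int :=
  if level.isEmpty then order
  else
    let order' := order ++ level
    let indeg' := bDec dependents level indeg
    let level' := remaining.filter (fun k => indeg'.getD k 0 == 0)
    let remaining' := remaining.filter (fun k => !(indeg'.getD k 0 == 0))
    SolB_loop dependents level' remaining' indeg' order'
termination_by remaining.length + level.length
decreasing_by
  rename_i hl
  have h1 := (List.length_eq_length_filter_add
      (l := remaining) (fun k => (bDec dependents level indeg).getD k 0 == 0)).symm
  simp only [List.unattach_filter, List.unattach_attach] at *
  simp only [← List.countP_eq_length_filter] at h1 ⊢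
  have h2 : 0 < level.length := by
    cases level with
    | nil => simp at hl
    | cons a t => simp
  omega

def Solution_alt (ar : List (Int × List Int)) : Option (List Int) :=
  let dct := PySem.Dict.ofList ar
  let its := dct.items
  let level := (its.filter (fun kv => kv.2.length == 0)).map (·.1)
  if level.isEmpty then none
  else
    let indeg : PySem.Dict Int Int :=
      its.foldl (fun d kv => d.insert kv.1 (kv.2.length : Int)) PySem.Dict.empty
    let deps0 : PySem.Dict Int (List Int) :=
      its.foldl (fun d kv => d.insert kv.1 []) PySem.Dict.empty
    let dependents : PySem.Dict Int (List Int) :=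
      its.foldl (fun d kv =>
        kv.2.foldl (fun d p => if d.contains p then d.modify p [] (fun l => l ++ [kv.1]) else d) d) deps0
    let remaining := (its.filter (fun kv => !(kv.2.length == 0))).map (·.1)
    some (SolB_loop dependents level remaining indeg [])

-- ===== PRECONDITION & SPEC =====
def Spec_Solution (ar : List (Int × List Int)) (out : Option (List Int)) : Prop := out = Solution_alt ar
instance (ar : List (Int × List Int)) (out : Option (List Int)) : Decidable (Spec_Solution ar out) := by unfold Spec_Solution; infer_instance

-- ===== CLAIM (what is proved, stated in full; the proofs are below) =====
def Claim_equal_Solution : Prop := ∀ (ar : List (Int × List Int)), Dom_Solution ar → Spec_Solution ar (Solution ar)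

-- ===== LEMMAS AND PROOFS =====

-- readiness as a membership statement
lemma aReady_iff (dct : PySem.Dict Int (List Int)) (d : PySem.Set Int) (k : Int) :
    aReady dct d k = true ↔ ∀ c ∈ dct.getD k [], c ∈ d := by
  simp [aReady, List.all_eq_true]

-- counting split: occurrences outside `order` = outside `order ++ level` plus inside `level`
lemma countP_not_append_split (order level l : List Int) (hdisj : ∀ c ∈ level, c ∉ order) :
    l.countP (fun c => !decide (c ∈ order)) =
      l.countP (fun c => !decide (c ∈ order ++ level)) + l.countP (fun c => decide (c ∈ level)) := by
  induction l with
  | nil => simp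
  | cons a t ih =>
    simp only [List.countP_cons, ih]
    by_cases h1 : a ∈ order <;> by_cases h2 : a ∈ level <;>
      simp [h1, h2, List.mem_append] <;> first | omega | exact absurd h1 (hdisj a h2)

-- occurrences of elements equal to j or in t, j outside t
lemma countP_cons_mem (j : Int) (t : List Int) (hj : j ∉ t) (l : List Int) :
    l.countP (fun c => decide (c ∈ j :: t)) = l.count j + l.countP (fun c => decide (c ∈ t)) := by
  rw [show (fun c => decide (c ∈ j :: t)) = (fun c => decide (c = j) || decide (c ∈ t)) from
    funext fun c => by simp [List.mem_cons]]
  induction l with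
  | nil => simp
  | cons a s ihs =>
    rw [List.countP_cons, List.count_cons, List.countP_cons, ihs]
    by_cases ha : a = j
    · subst ha; simp [hj]; omega
    · by_cases ht : a ∈ t <;> simp [ha, ht] <;>
        omega

-- occurrences of members of a Nodup list = sum of the individual counts
lemma countP_mem_eq_sum_count (level : List Int) (hnd : level.Nodup) (l : List Int) :
    l.countP (fun c => decide (c ∈ level)) = (level.map (fun j => l.count j)).sum := by
  induction level with
  | nil => simp
  | cons j t ih =>
    rcases List.nodup_cons.mp hnd with ⟨hj, hndt⟩
    rw [countP_cons_mem j t hj, ih hndt]; simp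

-- one pop step: `courses.pop(courses.index(h))` removes the first occurrence of h
lemma aPopStep_mem {courses : List Int} {d : PySem.Set Int} {rv : List Int} {h : Int}
    (hm : h ∈ courses) :
    aPopStep (courses, d, rv) h = (courses.erase h, PySem.Set.add d h, rv ++ [h]) := by
  obtain ⟨k, hk⟩ : ∃ k, PySem.List.index? courses h = some k := by
    cases heq : PySem.List.index? courses h with
    | none => exact absurd ((PySem.List.index?_eq_none_iff _ _).mp heq) (by simp [hm])
    | some k => exact ⟨k, rfl⟩
  obtain ⟨hklt, hget, -⟩ := PySem.List.getElem_of_index?_eq_some hk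
  obtain ⟨pre, suf, hdec, hlen, hpre⟩ := (PySem.List.index?_eq_some_iff _ _ _).mp hk
  have herase : courses.eraseIdx k = courses.erase h := by
    subst hdec
    rw [List.erase_append_right _ hpre, List.erase_cons_head, ← hlen,
        List.eraseIdx_append_of_length_le (le_refl _)]
    simp
  rw [PySem.List.index?_eq_idxOf?] at hk
  simp only [aPopStep, hk, PySem.List.index?_eq_idxOf?, PySem.List.pop?_natCast courses k hklt,
    hget, herase]

-- the whole pop loop removes `hold` from `courses`, adds it to d and appends it to retVal
lemma popFold_char :
    ∀ (hold courses : List Int) (d : PySem.Set Int) (rv : List Int),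
    hold.Nodup → courses.Nodup → (∀ h ∈ hold, h ∈ courses) →
    hold.foldl aPopStep (courses, d, rv) =
      (courses.filter (fun x => !decide (x ∈ hold)), PySem.Set.update d hold, rv ++ hold) := by
  intro hold
  induction hold with
  | nil => intro courses d rv _ _ _; simp [PySem.Set.update]
  | cons h t ih =>
    intro courses d rv hnd hcnd hsub
    rcases List.nodup_cons.mp hnd with ⟨hht, hndt⟩
    have hmem : h ∈ courses := hsub h (by simp)
    rw [List.foldl_cons, aPopStep_mem hmem, PySem.Set.update_cons]
    have hsub' : ∀ x ∈ t, x ∈ courses.erase h := by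
      intro x hx
      have hxh : x ≠ h := by rintro rfl; exact hht hx
      exact (List.mem_erase_of_ne hxh).mpr (hsub x (List.mem_cons_of_mem _ hx))
    rw [ih (courses.erase h) _ _ hndt (hcnd.erase h) hsub']
    refine congrArg₂ _ ?_ (congrArg _ (by simp))
    rw [hcnd.erase_eq_filter, List.filter_filter]
    apply List.filter_congr
    intro x _
    by_cases h1 : x = h
    · subst h1; simp [hht]
    · by_cases h2 : x ∈ t <;> simp [h1, h2]

-- phase 1 of A: partition of the dict items by empty prerequisite list
lemma phase1_char :
    ∀ (l : List (Int × List Int)) (ef : Bool) (cs : List Int) (d : PySem.Set Int) (rv : List Int),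
    l.foldl (fun st kv =>
      if kv.2.length == 0 then (true, st.2.1, PySem.Set.add st.2.2.1 kv.1, st.2.2.2 ++ [kv.1])
      else (st.1, st.2.1 ++ [kv.1], st.2.2.1, st.2.2.2)) (ef, cs, d, rv) =
      (ef || l.any (fun kv => kv.2.length == 0),
       cs ++ (l.filter (fun kv => !(kv.2.length == 0))).map (·.1),
       PySem.Set.update d ((l.filter (fun kv => kv.2.length == 0)).map (·.1)),
       rv ++ (l.filter (fun kv => kv.2.length == 0)).map (·.1)) := by
  intro l
  induction l with
  | nil => intro ef cs d rv; simp [PySem.Set.update]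
  | cons kv t ih =>
    intro ef cs d rv
    rw [List.foldl_cons]
    by_cases hkv : kv.2.length = 0
    · rw [if_pos (by simpa using hkv), ih]
      simp [hkv, PySem.Set.update_cons]
    · rw [if_neg (by simpa using hkv), ih]
      have hb : (kv.2.length == 0) = false := by simpa using hkv
      simp [hb]


-- ---- characterisation of B's dependents dict ----

-- step over the flattened edge list; an edge (p, k) means "course k has prerequisite p"
def depStep (d : PySem.Dict Int (List Int)) (e : Int × Int) : PySem.Dict Int (List Int) :=
  if d.contains e.1 then d.modify e.1 [] (fun l => l ++ [e.2]) else d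

lemma depFold_getD (es : List (Int × Int)) :
    ∀ (d : PySem.Dict Int (List Int)) (j : Int),
    (es.foldl depStep d).getD j [] =
      d.getD j [] ++ (if d.contains j then (es.filter (fun e => e.1 == j)).map (·.2) else []) := by
  induction es with
  | nil => intro d j; by_cases hc : d.contains j = true <;> simp [hc]
  | cons e t ih =>
    intro d j
    rw [List.foldl_cons, ih]
    unfold depStep
    by_cases hc : d.contains e.1 = true
    · rw [if_pos hc, PySem.Dict.contains_modify, PySem.Dict.getD_modify]
      by_cases hj : j = e.1
      · subst hj; simp [hc]
      · have hb : (j == e.1) = false := by simpa using hj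
        have hb' : (e.1 == j) = false := by simpa using Ne.symm hj
        simp [hj, hb, hb']
    · rw [if_neg hc]
      by_cases hj : j = e.1
      · subst hj; simp [hc]
      · have hb' : (e.1 == j) = false := by simpa using Ne.symm hj
        simp [hb']

-- the nested dependents-building loop of Source B is the fold of depStep over the edge list
lemma dependents_eq_depFold (its : List (Int × List Int)) (d0 : PySem.Dict Int (List Int)) :
    its.foldl (fun d kv =>
      kv.2.foldl (fun d p => if d.contains p then d.modify p [] (fun l => l ++ [kv.1]) else d) d) d0
    = (its.flatMap (fun kv => kv.2.map (fun p => (p, kv.1)))).foldl depStep d0 := by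
  rw [List.foldl_flatMap]
  exact congrArg (fun g => List.foldl g d0 its)
    (funext fun d => funext fun kv => by rw [List.foldl_map]; rfl)

lemma deps0_keys (its : List (Int × List Int)) (hnd : (its.map (·.1)).Nodup) :
    (its.foldl (fun d kv => d.insert kv.1 ([] : List Int)) PySem.Dict.empty).keys
      = its.map (·.1) := by
  rw [PySem.Dict.keys_foldl_insert_key its (·.1) (fun _ _ => ([] : List Int)) PySem.Dict.empty]
  simp [PySem.Set.update_nil_left, PySem.Set.ofList_eq_self_of_nodup _ hnd]

lemma deps0_getD (its : List (Int × List Int)) (hnd : (its.map (·.1)).Nodup) (j : Int) :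
    (its.foldl (fun d kv => d.insert kv.1 ([] : List Int)) PySem.Dict.empty).getD j [] = [] := by
  set d0 := its.foldl (fun d kv => d.insert kv.1 ([] : List Int)) PySem.Dict.empty with hd0
  by_cases hc : d0.contains j = true
  · have hjk : j ∈ its.map (·.1) := by
      have := (PySem.Dict.contains_iff_mem_keys d0 j).mp hc
      rwa [hd0, deps0_keys its hnd] at this
    obtain ⟨kv, hkv, hkv1⟩ := List.mem_map.mp hjk
    have hitems : d0.items = its.map (fun kv => (kv.1, ([] : List Int))) := by
      rw [hd0, PySem.Dict.items_foldl_insert_fresh its (·.1) (fun _ => ([] : List Int))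
        PySem.Dict.empty (fun a _ => rfl) hnd]
      simp only [show (PySem.Dict.empty : PySem.Dict Int (List Int)).items = [] from rfl,
        List.nil_append]
    have hmem : (j, ([] : List Int)) ∈ d0.items := by
      rw [hitems]
      exact List.mem_map.mpr ⟨kv, hkv, by rw [hkv1]⟩
    exact PySem.Dict.getD_of_mem_items d0 hmem (by rw [hd0, deps0_keys its hnd]; exact hnd) []
  · exact PySem.Dict.getD_of_not_contains d0 [] (by simpa using hc)

lemma indeg0_getD (its : List (Int × List Int)) (hnd : (its.map (·.1)).Nodup)
    {kv : Int × List Int} (hm : kv ∈ its) (z : Int) :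
    (its.foldl (fun d kv => d.insert kv.1 (kv.2.length : Int)) PySem.Dict.empty).getD kv.1 z
      = (kv.2.length : Int) := by
  set d0 := its.foldl (fun d kv => d.insert kv.1 (kv.2.length : Int)) PySem.Dict.empty with hd0
  have hitems : d0.items = its.map (fun kv => (kv.1, (kv.2.length : Int))) := by
    rw [hd0, PySem.Dict.items_foldl_insert_fresh its (·.1) (fun kv => (kv.2.length : Int))
      PySem.Dict.empty (fun a _ => rfl) hnd]
    simp only [show (PySem.Dict.empty : PySem.Dict Int Int).items = [] from rfl,
      List.nil_append]
  have hknd : d0.keys.Nodup := by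
    simp only [PySem.Dict.keys, hitems, List.map_map]
    simpa [Function.comp] using hnd
  exact PySem.Dict.getD_of_mem_items d0 (by rw [hitems]; exact List.mem_map.mpr ⟨kv, hm, rfl⟩) hknd z

-- countP over a flatMap is the sum of the member countPs
lemma countP_flatMap' {α β : Type} (l : List α) (g : α → List β) (q : β → Bool) :
    ((l.flatMap g).countP q) = (l.map (fun a => (g a).countP q)).sum := by
  induction l with
  | nil => simp
  | cons a t ih => simp [List.flatMap_cons, List.countP_append, ih]

-- a sum of key-guarded terms over a Nodup-key list collapses to the single match
lemma sum_map_ite_key (l : List (Int × List Int)) (F : Int × List Int → Nat) :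
    ∀ (x : Int) (vx : List Int), (l.map (·.1)).Nodup → (x, vx) ∈ l →
    (l.map (fun kv => if kv.1 = x then F kv else 0)).sum = F (x, vx) := by
  induction l with
  | nil => intro x vx _ hm; cases hm
  | cons kv t ih =>
    intro x vx hnd hm
    rw [List.map_cons] at hnd
    rcases List.nodup_cons.mp hnd with ⟨hh, hndt⟩
    rw [List.map_cons, List.sum_cons]
    by_cases hx : kv.1 = x
    · subst hx
      have hkv : kv = (kv.1, vx) := by
        rcases List.mem_cons.mp hm with h | h
        · exact h.symm
        · exact absurd (List.mem_map.mpr ⟨(kv.1, vx), h, rfl⟩) hh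
      have hz : (t.map (fun kv' => if kv'.1 = kv.1 then F kv' else 0)).sum = 0 := by
        apply List.sum_eq_zero
        intro n hn
        obtain ⟨kv', hkv', rfl⟩ := List.mem_map.mp hn
        have hne : kv'.1 ≠ kv.1 := by
          intro he
          exact hh (he ▸ List.mem_map.mpr ⟨kv', hkv', rfl⟩)
        simp [hne]
      rw [if_pos rfl, hz, Nat.add_zero]
      exact congrArg F hkv
    · have hm' : (x, vx) ∈ t := by
        rcases List.mem_cons.mp hm with h | h
        · exact absurd (by rw [← h]) hx
        · exact h
      rw [if_neg hx, ih x vx hndt hm']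
      omega

-- count of a course in a dependents adjacency list = count of the key in that course's prereqs
lemma dependents_count (its : List (Int × List Int)) (hnd : (its.map (·.1)).Nodup)
    {j x : Int} {vx : List Int} (hj : j ∈ its.map (·.1)) (hx : (x, vx) ∈ its) :
    ((its.foldl (fun d kv =>
        kv.2.foldl (fun d p => if d.contains p then d.modify p [] (fun l => l ++ [kv.1]) else d) d)
      (its.foldl (fun d kv => d.insert kv.1 ([] : List Int)) PySem.Dict.empty)).getD j []).count x
      = vx.count j := by
  rw [dependents_eq_depFold, depFold_getD, deps0_getD its hnd]
  have hcj : (its.foldl (fun d kv => d.insert kv.1 ([] : List Int)) PySem.Dict.empty).contains j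
      = true := (PySem.Dict.contains_iff_mem_keys _ j).mpr (by rwa [deps0_keys its hnd])
  rw [hcj, if_pos rfl, List.nil_append]
  have hcnt : ((((its.flatMap fun kv => kv.2.map fun p => (p, kv.1))).filter
        (fun e => e.1 == j)).map (·.2)).count x
      = ((its.flatMap fun kv => kv.2.map fun p => (p, kv.1))).countP
        (fun e => (e.2 == x) && (e.1 == j)) := by
    rw [List.count_eq_countP, List.countP_map, List.countP_filter]
    exact List.countP_congr (fun e _ => Iff.rfl)
  rw [hcnt, countP_flatMap']
  have hper : ∀ kv ∈ its,
      (kv.2.map (fun p => (p, kv.1))).countP (fun e => (e.2 == x) && (e.1 == j))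
        = if kv.1 = x then kv.2.count j else 0 := by
    intro kv _
    rw [List.countP_map]
    by_cases hkx : kv.1 = x
    · rw [if_pos hkx, List.count_eq_countP]
      apply List.countP_congr
      intro p _
      simp [hkx]
    · rw [if_neg hkx]
      apply List.countP_eq_zero.mpr
      intro p _
      simp [Function.comp, hkx]
  rw [List.map_congr_left hper]
  exact sum_map_ite_key its (fun kv => kv.2.count j) x vx hnd hx

-- decrement loop over one adjacency list
lemma decAll_getD (ds : List Int) :
    ∀ (ind : PySem.Dict Int Int) (x : Int),
    (ds.foldl (fun ind dep => ind.modify dep 0 (fun v => v - 1)) ind).getD x 0 =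
      ind.getD x 0 - (ds.count x : Int) := by
  induction ds with
  | nil => intro ind x; simp
  | cons dep t ih =>
    intro ind x
    rw [List.foldl_cons, ih, PySem.Dict.getD_modify, List.count_cons]
    by_cases hx : x = dep <;> simp [hx] <;> omega

-- the whole decrement phase of one Source B round
lemma bDec_getD (dependents : PySem.Dict Int (List Int)) (level : List Int) :
    ∀ (ind : PySem.Dict Int Int) (x : Int),
    (bDec dependents level ind).getD x 0 =
      ind.getD x 0 - ((level.map (fun j => ((dependents.getD j []).count x : Int))).sum) := by
  induction level with
  | nil => intro ind x; simp [bDec]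
  | cons j t ih =>
    intro ind x
    simp only [bDec, List.foldl_cons] at *
    rw [ih, decAll_getD]
    simp; omega

-- ---- the two loops ----

lemma SolA_loop_nil (dct : PySem.Dict Int (List Int)) (fuel : Nat) (d : PySem.Set Int)
    (rv : List Int) : SolA_loop dct fuel [] d rv = rv := by
  cases fuel <;> simp [SolA_loop]

lemma SolB_loop_empty (deps : PySem.Dict Int (List Int)) (remaining : List Int)
    (indeg : PySem.Dict Int Int) (order : List Int) :
    SolB_loop deps [] remaining indeg order = order := by
  rw [SolB_loop]
  simp

lemma SolB_loop_cons (deps : PySem.Dict Int (List Int)) (level remaining : List Int)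
    (indeg : PySem.Dict Int Int) (order : List Int) (h : level ≠ []) :
    SolB_loop deps level remaining indeg order =
      SolB_loop deps
        (remaining.filter (fun k => (bDec deps level indeg).getD k 0 == 0))
        (remaining.filter (fun k => !((bDec deps level indeg).getD k 0 == 0)))
        (bDec deps level indeg) (order ++ level) := by
  rw [SolB_loop]
  simp [h]

lemma SolB_loop_nil_remaining (deps : PySem.Dict Int (List Int)) (level : List Int)
    (indeg : PySem.Dict Int Int) (order : List Int) :
    SolB_loop deps level [] indeg order = order ++ level := by
  cases level with
  | nil => rw [SolB_loop_empty]; simp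
  | cons a t =>
    rw [SolB_loop_cons _ _ _ _ _ (by simp), List.filter_nil, List.filter_nil, SolB_loop_empty]

-- after the decrements for `level`, the indegree of a remaining course counts its
-- prerequisite occurrences outside order ++ level
lemma bDec_char_core (dct deps : PySem.Dict Int (List Int)) (K level order courses : List Int)
    (indeg : PySem.Dict Int Int)
    (hdep : ∀ j ∈ K, ∀ x ∈ K, (deps.getD j []).count x = (dct.getD x []).count j)
    (hcK : ∀ k ∈ courses, k ∈ K) (hlK : ∀ k ∈ level, k ∈ K)
    (hlnd : level.Nodup) (hdisj : ∀ c ∈ level, c ∉ order)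
    (hind : ∀ k ∈ courses,
      indeg.getD k 0 = ((dct.getD k []).countP (fun c => !decide (c ∈ order)) : Int)) :
    ∀ k ∈ courses, (bDec deps level indeg).getD k 0 =
      ((dct.getD k []).countP (fun c => !decide (c ∈ order ++ level)) : Int) := by
  intro k hk
  rw [bDec_getD, hind k hk]
  have hmap : level.map (fun j => ((deps.getD j []).count k : Int))
      = level.map (fun j => ((dct.getD k []).count j : Int)) :=
    List.map_congr_left (fun j hj => by rw [hdep j (hlK j hj) k (hcK k hk)])
  rw [hmap]
  have hsum : (level.map (fun j => ((dct.getD k []).count j : Int))).sum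
      = (((level.map (fun j => (dct.getD k []).count j)).sum : Nat) : Int) := by
    rw [Nat.cast_list_sum, List.map_map]
    rfl
  rw [hsum]
  have h1 := countP_not_append_split order level (dct.getD k []) hdisj
  have h2 := countP_mem_eq_sum_count level hlnd (dct.getD k [])
  omega

-- a course is ready for A exactly when its decremented B-indegree is zero
lemma ready_eq_core (dct deps : PySem.Dict Int (List Int)) (K level order courses : List Int)
    (d : PySem.Set Int) (indeg : PySem.Dict Int Int)
    (hdep : ∀ j ∈ K, ∀ x ∈ K, (deps.getD j []).count x = (dct.getD x []).count j)
    (hcK : ∀ k ∈ courses, k ∈ K) (hlK : ∀ k ∈ level, k ∈ K)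
    (hlnd : level.Nodup) (hdisj : ∀ c ∈ level, c ∉ order)
    (hind : ∀ k ∈ courses,
      indeg.getD k 0 = ((dct.getD k []).countP (fun c => !decide (c ∈ order)) : Int))
    (hd : ∀ x, x ∈ d ↔ x ∈ order ++ level) :
    ∀ k ∈ courses, aReady dct d k = ((bDec deps level indeg).getD k 0 == 0) := by
  intro k hk
  rw [bDec_char_core dct deps K level order courses indeg hdep hcK hlK hlnd hdisj hind k hk]
  apply Bool.coe_iff_coe.mp
  rw [aReady_iff]
  rw [beq_iff_eq, Int.natCast_eq_zero, List.countP_eq_zero]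
  constructor
  · intro hall c hc
    simp [(hd c).mp (hall c hc)]
  · intro hall c hc
    have h' := hall c hc
    simp only [Bool.not_eq_true', decide_eq_false_iff_not, not_not] at h'
    exact (hd c).mpr h' 

-- the heart of the equivalence: both loops produce the same final list
lemma loop_eq (dct deps : PySem.Dict Int (List Int)) (K : List Int)
    (hdep : ∀ j ∈ K, ∀ x ∈ K, (deps.getD j []).count x = (dct.getD x []).count j) :
    ∀ (fuel : Nat) (courses level order : List Int) (d : PySem.Set Int)
      (indeg : PySem.Dict Int Int),
    ((order ++ level) ++ courses).Nodup →
    (∀ x, x ∈ d ↔ x ∈ order ++ level) →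
    (∀ k ∈ courses, k ∈ K) →
    (∀ k ∈ level, k ∈ K) →
    (∀ k ∈ courses,
      indeg.getD k 0 = ((dct.getD k []).countP (fun c => !decide (c ∈ order)) : Int)) →
    (level = [] → courses.filter (aReady dct d) = []) →
    (courses.length ≤ fuel ∨ courses.filter (aReady dct d) = []) →
    SolA_loop dct fuel courses d (order ++ level) = SolB_loop deps level courses indeg order := by
  intro fuel
  induction fuel with
  | zero =>
    intro courses level order d indeg hnd hd hcK hlK hind hstall hfuel
    have hA : SolA_loop dct 0 courses d (order ++ level) = order ++ level := rfl
    rw [hA]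
    rcases List.nodup_append.mp hnd with ⟨hndOL, hndC, hdisjOLC⟩
    rcases List.nodup_append.mp hndOL with ⟨hndO, hndL, hdisjOL⟩
    have hhold : courses.filter (aReady dct d) = [] := by
      rcases hfuel with hf | hh
      · have : courses = [] := List.eq_nil_of_length_eq_zero (Nat.le_zero.mp hf)
        simp [this]
      · exact hh
    by_cases hc0 : courses = []
    · rw [hc0, SolB_loop_nil_remaining]
    · by_cases hl : level = []
      · subst hl
        rw [SolB_loop_empty]
        simp
      · rw [SolB_loop_cons _ _ _ _ _ hl]
        have hready := ready_eq_core dct deps K level order courses d indeg hdep hcK hlK hndL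
          (fun c hc ho => hdisjOL c ho c hc rfl) hind hd
        have hlev' : courses.filter (fun k => (bDec deps level indeg).getD k 0 == 0)
            = courses.filter (aReady dct d) :=
          List.filter_congr (fun k hk => (hready k hk).symm)
        rw [hlev', hhold, SolB_loop_empty]
  | succ fuel ih =>
    intro courses level order d indeg hnd hd hcK hlK hind hstall hfuel
    rcases List.nodup_append.mp hnd with ⟨hndOL, hndC, hdisjOLC⟩
    rcases List.nodup_append.mp hndOL with ⟨hndO, hndL, hdisjOL⟩
    by_cases hc0 : courses = []
    · rw [hc0, SolA_loop_nil, SolB_loop_nil_remaining]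
    · -- unfold one round of A
      have hA : SolA_loop dct (fuel + 1) courses d (order ++ level)
          = SolA_loop dct fuel
            (courses.filter (fun x => !(aReady dct d x)))
            (PySem.Set.update d (courses.filter (aReady dct d)))
            ((order ++ level) ++ courses.filter (aReady dct d)) := by
        have hne : courses.isEmpty = false := List.isEmpty_eq_false_iff.mpr hc0
        rw [SolA_loop]
        rw [if_neg (by simp [hne])]
        simp only []
        have hholdeq : courses.foldl
            (fun hold k => if aReady dct d k then hold ++ [k] else hold) []
            = courses.filter (aReady dct d) := by
          rw [PySem.List.foldl_append_if (aReady dct d) (fun x => x) courses []]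
          simp
        rw [hholdeq]
        have hsubset : ∀ h ∈ courses.filter (aReady dct d), h ∈ courses :=
          fun h hh => (List.mem_filter.mp hh).1
        rw [popFold_char (courses.filter (aReady dct d)) courses d (order ++ level)
          (hndC.filter _) hndC hsubset]
        have hcourses' : courses.filter (fun x => !decide (x ∈ courses.filter (aReady dct d)))
            = courses.filter (fun x => !(aReady dct d x)) := by
          apply List.filter_congr
          intro x hx
          by_cases hr : aReady dct d x = true
          · simp [List.mem_filter, hx, hr]
          · simp [List.mem_filter, hr]
        rw [hcourses']
    -- the new joint state
      by_cases hl : level = []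
      · subst hl
        have hhold : courses.filter (aReady dct d) = [] := hstall rfl
        rw [hA, hhold]
        have hfix : courses.filter (fun x => !(aReady dct d x)) = courses := by
          apply List.filter_eq_self.mpr
          intro x hx
          have : aReady dct d x = false := by
            by_contra hcon
            have : x ∈ courses.filter (aReady dct d) := by
              rw [List.mem_filter]
              exact ⟨hx, by revert hcon; cases aReady dct d x <;> simp⟩
            simp [hhold] at this
          simp [this]
        rw [hfix]
        have hupd : PySem.Set.update d [] = d := rfl
        rw [hupd]
        simp only [List.append_nil]
        have hres := ih courses [] order d indeg (by simpa using hnd) (by simpa using hd) hcK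
          (by simp) hind (fun _ => hhold) (Or.inr hhold)
        simpa using hres
      · rw [hA, SolB_loop_cons _ _ _ _ _ hl]
        have hready := ready_eq_core dct deps K level order courses d indeg hdep hcK hlK hndL
          (fun c hc ho => hdisjOL c ho c hc rfl) hind hd
        have hlev' : courses.filter (fun k => (bDec deps level indeg).getD k 0 == 0)
            = courses.filter (aReady dct d) :=
          List.filter_congr (fun k hk => (hready k hk).symm)
        have hrem' : courses.filter (fun k => !((bDec deps level indeg).getD k 0 == 0))
            = courses.filter (fun x => !(aReady dct d x)) :=
          List.filter_congr (fun k hk => by rw [hready k hk])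
        rw [hlev', hrem']
        -- apply the induction hypothesis at the new state
        have hperm : (((order ++ level) ++ courses.filter (aReady dct d))
            ++ courses.filter (fun x => !(aReady dct d x))).Perm ((order ++ level) ++ courses) := by
          rw [List.append_assoc]
          exact List.Perm.append_left _ (List.filter_append_perm _ _)
        have hnd2 : (((order ++ level) ++ courses.filter (aReady dct d))
            ++ courses.filter (fun x => !(aReady dct d x))).Nodup :=
          hperm.nodup_iff.mpr hnd
        have hd2 : ∀ x, x ∈ PySem.Set.update d (courses.filter (aReady dct d)) ↔
            x ∈ (order ++ level) ++ courses.filter (aReady dct d) := by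
          intro x
          rw [PySem.Set.mem_update, List.mem_append, hd x]
        have hind2 : ∀ k ∈ courses.filter (fun x => !(aReady dct d x)),
            (bDec deps level indeg).getD k 0 =
              ((dct.getD k []).countP (fun c => !decide (c ∈ order ++ level)) : Int) :=
          fun k hk => bDec_char_core dct deps K level order courses indeg hdep hcK hlK hndL
            (fun c hc ho => hdisjOL c ho c hc rfl) hind k (List.mem_filter.mp hk).1
        have hstall2 : courses.filter (aReady dct d) = [] →
            (courses.filter (fun x => !(aReady dct d x))).filter
              (aReady dct (PySem.Set.update d (courses.filter (aReady dct d)))) = [] := by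
          intro hh
          rw [hh]
          have hupd : PySem.Set.update d [] = d := rfl
          rw [hupd, List.filter_filter]
          apply List.filter_eq_nil_iff.mpr
          intro x hx
          cases aReady dct d x <;> simp
        have hfuel2 : (courses.filter (fun x => !(aReady dct d x))).length ≤ fuel ∨
            (courses.filter (fun x => !(aReady dct d x))).filter
              (aReady dct (PySem.Set.update d (courses.filter (aReady dct d)))) = [] := by
          by_cases hh : courses.filter (aReady dct d) = []
          · exact Or.inr (hstall2 hh)
          · left
            rcases hfuel with hf | hf
            · have hsplit := (List.length_eq_length_filter_add
                (l := courses) (aReady dct d)).symm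
              have hpos : 0 < (courses.filter (aReady dct d)).length := by
                cases heq : courses.filter (aReady dct d) with
                | nil => exact absurd heq hh
                | cons a t => simp
              omega
            · exact absurd hf hh
        exact ih (courses.filter (fun x => !(aReady dct d x)))
          (courses.filter (aReady dct d)) (order ++ level)
          (PySem.Set.update d (courses.filter (aReady dct d))) (bDec deps level indeg)
          hnd2 hd2
          (fun k hk => hcK k (List.mem_filter.mp hk).1)
          (fun k hk => hcK k (List.mem_filter.mp hk).1)
          hind2 hstall2 hfuel2

-- ---- assembling the top level ----

-- keys of the dict, with no duplicates
lemma keys_nodup (ar : List (Int × List Int)) :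
    ((PySem.Dict.ofList ar).items.map (·.1)).Nodup := by
  have := PySem.Dict.nodup_keys_ofList ar
  simpa [PySem.Dict.keys] using this

-- values looked up in the dict are the item components
lemma getD_of_item (ar : List (Int × List Int)) {kv : Int × List Int}
    (hm : kv ∈ (PySem.Dict.ofList ar).items) :
    (PySem.Dict.ofList ar).getD kv.1 [] = kv.2 := by
  exact PySem.Dict.getD_of_mem_items _ (by exact hm) (PySem.Dict.nodup_keys_ofList ar) []

-- the dependents dict of B satisfies the counting property loop_eq needs
lemma hdep_main (ar : List (Int × List Int)) :
    ∀ j ∈ (PySem.Dict.ofList ar).items.map (·.1),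
    ∀ x ∈ (PySem.Dict.ofList ar).items.map (·.1),
    (((PySem.Dict.ofList ar).items.foldl (fun d kv =>
        kv.2.foldl (fun d p => if d.contains p then d.modify p [] (fun l => l ++ [kv.1]) else d) d)
      ((PySem.Dict.ofList ar).items.foldl (fun d kv => d.insert kv.1 ([] : List Int))
        PySem.Dict.empty)).getD j []).count x
      = ((PySem.Dict.ofList ar).getD x []).count j := by
  intro j hj x hx
  obtain ⟨kv, hkv, hkv1⟩ := List.mem_map.mp hx
  have hxv : (x, kv.2) ∈ (PySem.Dict.ofList ar).items := by rw [← hkv1]; exact hkv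
  rw [dependents_count (PySem.Dict.ofList ar).items (keys_nodup ar) hj hxv]
  have := getD_of_item ar hkv
  rw [hkv1] at this
  rw [this]

-- the two initial partitions together are a permutation of the keys
lemma init_nodup (ar : List (Int × List Int)) :
    ((((PySem.Dict.ofList ar).items.filter (fun kv => kv.2.length == 0)).map (·.1))
      ++ (((PySem.Dict.ofList ar).items.filter (fun kv => !(kv.2.length == 0))).map (·.1))).Nodup := by
  have hperm := (List.filter_append_perm (fun kv => kv.2.length == 0)
    (PySem.Dict.ofList ar).items).map (·.1)
  rw [List.map_append] at hperm
  exact hperm.nodup_iff.mpr (keys_nodup ar)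

-- ===== VERDICT (by name: the statement is the Claim_ definition above) =====
theorem Solution_spec : Claim_equal_Solution := by
  unfold Claim_equal_Solution Spec_Solution
  intro ar _
  unfold Solution Solution_alt
  simp only []
  rw [phase1_char]
  simp only [Bool.false_or, List.nil_append]
  by_cases hany : ((PySem.Dict.ofList ar).items.any fun kv => kv.2.length == 0) = true
  · -- at least one course with no prerequisites: both sides run their loops
    obtain ⟨kv0, hkv0, hpe0⟩ := List.any_eq_true.mp hany
    have hne0 : (((PySem.Dict.ofList ar).items.filter
        (fun kv => kv.2.length == 0)).map (·.1)) ≠ [] :=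
      List.ne_nil_of_mem (List.mem_map.mpr ⟨kv0, List.mem_filter.mpr ⟨hkv0, hpe0⟩, rfl⟩)
    rw [if_neg (by simp [hany]), if_neg (by simpa using hne0)]
    apply congrArg some
    have hcK : ∀ k ∈ (((PySem.Dict.ofList ar).items.filter
        (fun kv => !(kv.2.length == 0))).map (·.1)), k ∈ (PySem.Dict.ofList ar).items.map (·.1) := by
      intro k hk
      obtain ⟨kv, hkv, rfl⟩ := List.mem_map.mp hk
      exact List.mem_map.mpr ⟨kv, (List.mem_filter.mp hkv).1, rfl⟩
    have hlK : ∀ k ∈ (((PySem.Dict.ofList ar).items.filter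
        (fun kv => kv.2.length == 0)).map (·.1)), k ∈ (PySem.Dict.ofList ar).items.map (·.1) := by
      intro k hk
      obtain ⟨kv, hkv, rfl⟩ := List.mem_map.mp hk
      exact List.mem_map.mpr ⟨kv, (List.mem_filter.mp hkv).1, rfl⟩
    have hind0 : ∀ k ∈ (((PySem.Dict.ofList ar).items.filter
        (fun kv => !(kv.2.length == 0))).map (·.1)),
        ((PySem.Dict.ofList ar).items.foldl (fun d kv => d.insert kv.1 (kv.2.length : Int))
          PySem.Dict.empty).getD k 0
        = (((PySem.Dict.ofList ar).getD k []).countP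
            (fun c => !decide (c ∈ ([] : List Int))) : Int) := by
      intro k hk
      obtain ⟨kv, hkv, rfl⟩ := List.mem_map.mp hk
      have hm : kv ∈ (PySem.Dict.ofList ar).items := (List.mem_filter.mp hkv).1
      rw [indeg0_getD (PySem.Dict.ofList ar).items (keys_nodup ar) hm 0, getD_of_item ar hm]
      simp
    have hres := loop_eq (PySem.Dict.ofList ar) _ ((PySem.Dict.ofList ar).items.map (·.1))
      (hdep_main ar)
      (((PySem.Dict.ofList ar).items.filter (fun kv => !(kv.2.length == 0))).map (·.1)).length
      (((PySem.Dict.ofList ar).items.filter (fun kv => !(kv.2.length == 0))).map (·.1))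
      (((PySem.Dict.ofList ar).items.filter (fun kv => kv.2.length == 0)).map (·.1))
      []
      (PySem.Set.empty.update (((PySem.Dict.ofList ar).items.filter
        (fun kv => kv.2.length == 0)).map (·.1)))
      ((PySem.Dict.ofList ar).items.foldl (fun d kv => d.insert kv.1 (kv.2.length : Int))
        PySem.Dict.empty)
      (by simpa using init_nodup ar)
      (by
        intro x
        rw [PySem.Set.mem_update]
        simp [PySem.Set.empty])
      hcK hlK hind0
      (fun h => absurd h hne0)
      (Or.inl (le_refl _))
    simpa using hres
  · -- no course with empty prerequisites: both sides return none
    have hnil : (PySem.Dict.ofList ar).items.filter (fun kv => kv.2.length == 0) = [] := by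
      apply List.filter_eq_nil_iff.mpr
      intro kv hkv hcon
      exact hany (List.any_eq_true.mpr ⟨kv, hkv, hcon⟩)
    rw [if_pos (by simp [hany]), if_pos (by simp [hnil])]
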